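-- pv_equiv track=rewrite | github.com/swl10/pyslet | pyslet/urn.py | parse_urn
-- ===== SOURCE A (Python) =====
-- def is_upper(c):
--     """Returns True if c matches upper"""
--     return c and ord(c) >= 0x41 and ord(c) <= 0x5A
--
-- def is_lower(c):
--     """Returns True if c matches lower"""
--     return c and ord(c) >= 0x61 and ord(c) <= 0x7A
--
-- def is_number(c):
--     """Returns True if c matches number"""
--     return c and ord(c) >= 0x30 and ord(c) <= 0x39
--
-- def is_trans(c):
--     """Returns True if c matches trans
--
--     Note that translated characters include reserved characters, even
--     though they should normally be escaped (and in the case of '%' MUST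
--     be escaped).  The effect is that URNs consist of runs of characters
--     that match the production for trans."""
--     return c and (is_upper(c) or is_lower(c) or is_number(c) or
--                   is_other(c) or is_reserved(c))
--
-- def is_other(c):
--     """Returns True if c matches other"""
--     return c and c in "()+,-.:=@;$_!*'"
--
-- def is_reserved(c):
--     """Returns True if c matches reserved"""
--     return c and c in "%/?#"
--
-- def parse_urn(src):
--     """Parses a run of URN characters from a string
--
--     src
--         A binary string containing URN characters
--
--     returns the src up to, but not including, the first character that
--     fails to match the production for URN char."""
--     pos = 0
--     while pos < len(src):
--         c = src[pos]
--         if is_trans(c):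
--             pos += 1
--             continue
--         else:
--             break
--     src = src[:pos]
--     return src
-- ===== SOURCE B (Python) =====
-- _ALLOWED = frozenset(
--     "ABCDEFGHIJKLMNOPQRSTUVWXYZabcdefghijklmnopqrstuvwxyz0123456789"
--     "()+,-.:=@;$_!*'%/?#")
--
--
-- def parse_urn(src):
--     """Divide and conquer: the URN-char prefix of src is the whole left
--     half followed by the prefix of the right half when the left half
--     consists entirely of URN chars, and the prefix of the left half
--     otherwise.  Recursion bottoms out at strings of length <= 1."""
--     n = len(src)
--     if n == 0:
--         return src
--     if n == 1:
--         return src if src[0] in _ALLOWED else src[:0]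
--     mid = n // 2
--     left = parse_urn(src[:mid])
--     if len(left) == mid:
--         return src[:mid] + parse_urn(src[mid:])
--     return left
-- ===== Notes on version B (the rewrite author's own statement) =====
-- stated objective: alternative
-- what changed: B replaces A's linear while-loop with per-character five-way classification by a divide-and-conquer recursion on string halves: the URN prefix of src is the left half plus the right half's prefix if the left half's prefix is the whole left half, else the left half's prefix, with a frozenset membership test only at length-1 leaves.
import Mathlib
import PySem

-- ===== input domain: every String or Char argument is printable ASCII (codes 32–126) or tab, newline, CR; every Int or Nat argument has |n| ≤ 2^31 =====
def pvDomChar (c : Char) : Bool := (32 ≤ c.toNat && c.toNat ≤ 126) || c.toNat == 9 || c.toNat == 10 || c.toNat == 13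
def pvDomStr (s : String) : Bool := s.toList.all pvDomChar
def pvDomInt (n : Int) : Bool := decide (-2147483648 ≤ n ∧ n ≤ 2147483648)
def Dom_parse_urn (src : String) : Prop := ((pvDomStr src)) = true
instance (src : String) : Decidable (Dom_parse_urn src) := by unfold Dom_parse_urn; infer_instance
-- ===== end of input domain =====

-- B rewrite: A's linear while-loop is replaced by a divide-and-conquer recursion on
-- string halves (objective 'alternative': a genuinely different algorithm, not faster).

-- ===== PORT A =====
-- 'c and …' in the Python helpers is always truthy for the one-character strings
-- src[pos] yields, so the helpers are ported on Char without the truthiness test.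
def pvIsUpper (c : Char) : Bool := 0x41 ≤ c.toNat && c.toNat ≤ 0x5A
def pvIsLower (c : Char) : Bool := 0x61 ≤ c.toNat && c.toNat ≤ 0x7A
def pvIsNumber (c : Char) : Bool := 0x30 ≤ c.toNat && c.toNat ≤ 0x39
-- 'c in "…"' for a one-character c is exactly list membership of the char.
def pvIsOther (c : Char) : Bool := "()+,-.:=@;$_!*'".toList.contains c
def pvIsReserved (c : Char) : Bool := "%/?#".toList.contains c
def pvIsTrans (c : Char) : Bool :=
  pvIsUpper c || pvIsLower c || pvIsNumber c || pvIsOther c || pvIsReserved c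

-- the while loop: 'while pos < len(src): c = src[pos]; if is_trans(c): pos += 1 else break';
-- 'l[pos]?' is 'pos < len(src)' together with 'src[pos]'; fuel = len(src) bounds the loop.
def parse_urn_go (l : List Char) (pos fuel : Nat) : Nat :=
  match fuel with
  | 0 => pos
  | fuel' + 1 =>
    match l[pos]? with
    | some c => if pvIsTrans c then parse_urn_go l (pos + 1) fuel' else pos
    | none => pos

def parse_urn (src : String) : String :=
  let l := src.toList
  let pos := parse_urn_go l 0 l.length
  -- src[:pos] with 0 ≤ pos is take pos
  String.ofList (l.take pos)

-- ===== PORT B =====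
def pvAllowed : List Char :=
  "ABCDEFGHIJKLMNOPQRSTUVWXYZabcdefghijklmnopqrstuvwxyz0123456789()+,-.:=@;$_!*'%/?#".toList

-- 'c in _ALLOWED'
def pvUrnChar (c : Char) : Bool := pvAllowed.contains c

-- the recursion of Source B on the list of characters: length <= 1 is the base case
-- (empty string, or single char kept iff in _ALLOWED); otherwise split at mid = n//2,
-- recurse on the left half, and append the right half's result only when the left
-- half was consumed whole.
-- fuel = length of the list only makes the halving recursion structural; with
-- l.length ≤ fuel the 0-fuel branch is unreachable.
def parse_urn_alt_go (fuel : Nat) (l : List Char) : List Char :=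
  match fuel with
  | 0 => []
  | fuel + 1 =>
    if l.length ≤ 1 then
      match l with
      | [] => []
      | c :: _ => if pvUrnChar c then l else []
    else
      let mid := l.length / 2
      let left := parse_urn_alt_go fuel (l.take mid)
      if left.length = mid then l.take mid ++ parse_urn_alt_go fuel (l.drop mid) else left

def parse_urn_alt (src : String) : String :=
  String.ofList (parse_urn_alt_go src.toList.length src.toList)

-- ===== PRECONDITION & SPEC =====
def Spec_parse_urn (src : String) (out : String) : Prop := out = parse_urn_alt src
instance (src : String) (out : String) : Decidable (Spec_parse_urn src out) := by unfold Spec_parse_urn; infer_instance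

-- ===== CLAIM (what is proved, stated in full; the proofs are below) =====
def Claim_equal_parse_urn : Prop := ∀ (src : String), Dom_parse_urn src → Spec_parse_urn src (parse_urn src)

-- ===== LEMMAS AND PROOFS =====

-- the two character classifiers agree on every character code of the domain (< 128)
theorem pvTrans_eq_urnchar_all : ((List.range 128).all
    (fun n => pvIsTrans (Char.ofNat n) == pvUrnChar (Char.ofNat n))) = true := by
  decide

theorem pvTrans_eq_urnchar (c : Char) (h : c.toNat < 128) :
    pvIsTrans c = pvUrnChar c := by
  have h1 := List.all_eq_true.mp pvTrans_eq_urnchar_all c.toNat (List.mem_range.mpr h)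
  have h2 := beq_iff_eq.mp h1
  rwa [Char.ofNat_toNat] at h2

-- A's loop lands on the length of the takeWhile prefix
theorem parse_urn_go_eq (l : List Char) (fuel pos : Nat) (h : l.length ≤ pos + fuel) :
    parse_urn_go l pos fuel = pos + ((l.drop pos).takeWhile pvIsTrans).length := by
  induction fuel generalizing pos with
  | zero =>
    have : l.drop pos = [] := List.drop_eq_nil_of_le (by omega)
    simp [parse_urn_go, this]
  | succ fuel' ih =>
    by_cases hp : pos < l.length
    · have hdrop : l.drop pos = l[pos] :: l.drop (pos + 1) :=
        (List.getElem_cons_drop hp).symm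
      rw [parse_urn_go, List.getElem?_eq_getElem hp, hdrop, List.takeWhile_cons]
      cases ht : pvIsTrans l[pos] with
      | true => simp [ht, ih (pos + 1) (by omega)]; omega
      | false => simp [ht]
    · have hnone : l[pos]? = none := by
        simp; omega
      have : l.drop pos = [] := List.drop_eq_nil_of_le (by omega)
      simp [parse_urn_go, hnone, this]

-- takeWhile distributes over an append exactly as B's recursion combines halves
theorem takeWhile_app (p : Char → Bool) (a b : List Char) :
    (a ++ b).takeWhile p =
      if (a.takeWhile p).length = a.length then a ++ b.takeWhile p else a.takeWhile p := by
  induction a with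
  | nil => simp
  | cons x xs ih =>
    by_cases hx : p x
    · simp [hx, ih]
      split_ifs with h1 <;> simp_all
    · simp [hx]

-- B's divide-and-conquer computes the takeWhile prefix
theorem parse_urn_alt_go_eq : ∀ (fuel : Nat) (l : List Char), l.length ≤ fuel →
    parse_urn_alt_go fuel l = l.takeWhile pvUrnChar := by
  intro fuel
  induction fuel with
  | zero =>
    intro l hl
    have : l = [] := List.eq_nil_of_length_eq_zero (by omega)
    subst this
    simp [parse_urn_alt_go]
  | succ n ih =>
    intro l hl
    rw [parse_urn_alt_go.eq_def]
    by_cases h1 : l.length ≤ 1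
    · match l with
      | [] => simp
      | [c] => by_cases hc : pvUrnChar c <;> simp [hc]
      | _ :: _ :: _ => simp at h1
    · simp only [h1, if_neg, not_false_iff]
      have hmid1 : 1 ≤ l.length / 2 := by omega
      have hmid2 : l.length / 2 < l.length := by omega
      have hL : parse_urn_alt_go n (l.take (l.length / 2))
          = (l.take (l.length / 2)).takeWhile pvUrnChar := by
        apply ih; simp [List.length_take]; omega
      have hR : parse_urn_alt_go n (l.drop (l.length / 2))
          = (l.drop (l.length / 2)).takeWhile pvUrnChar := by
        apply ih; simp; omega
      have hsplit : l.take (l.length / 2) ++ l.drop (l.length / 2) = l :=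
        List.take_append_drop _ l
      have htk := takeWhile_app pvUrnChar (l.take (l.length / 2)) (l.drop (l.length / 2))
      rw [hsplit] at htk
      have hlen : (l.take (l.length / 2)).length = l.length / 2 := by
        simp [List.length_take]; omega
      rw [hL, hR, htk, hlen]

-- takeWhile only looks at members, so domain-wide predicate agreement suffices
theorem takeWhile_congr_mem {α : Type} (p q : α → Bool) (l : List α)
    (h : ∀ x ∈ l, p x = q x) : l.takeWhile p = l.takeWhile q := by
  induction l with
  | nil => rfl
  | cons x xs ih =>
    have hx := h x (by simp)
    by_cases hp : p x
    · simp [hp, hx ▸ hp, ih fun y hy => h y (by simp [hy])]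
    · have hq : q x = false := by rw [← hx]; simpa using hp
      simp [hp, hq]

-- ===== VERDICT (by name: the statement is the Claim_ definition above) =====
theorem parse_urn_spec : Claim_equal_parse_urn := by
  intro src hdom
  unfold Spec_parse_urn parse_urn parse_urn_alt
  simp only
  rw [parse_urn_alt_go_eq src.toList.length src.toList (le_refl _)]
  congr 1
  have hgo := parse_urn_go_eq src.toList src.toList.length 0 (by omega)
  rw [hgo, List.drop_zero, Nat.zero_add]
  have hcong : List.takeWhile pvIsTrans src.toList
      = List.takeWhile pvUrnChar src.toList := by
    apply takeWhile_congr_mem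
    intro x hx
    apply pvTrans_eq_urnchar
    have hd : pvDomChar x = true := by
      have := List.all_eq_true.mp hdom x hx
      simpa using this
    simp [pvDomChar] at hd
    omega
  rw [hcong]
  have hpre : List.takeWhile pvUrnChar src.toList <+: src.toList :=
    List.takeWhile_prefix _
  exact (List.prefix_iff_eq_take.mp hpre).symm
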